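-- pv_equiv track=rewrite | github.com/tmclnk/joco | scripts/b1_mine_github_data.py | get_diff_stats
-- ===== SOURCE A (Python) =====
-- def get_diff_stats(diff: str) -> str:
--     """Extract diff stats (file changes summary) from full diff."""
--     lines = diff.split('\n')
--     stats_lines = []
--
--     for line in lines:
--         # Look for lines that show file changes (before the actual diff content)
--         if line.startswith('diff --git'):
--             # Extract just the file path
--             parts = line.split()
--             if len(parts) >= 4:
--                 file_path = parts[2].replace('a/', '')
--                 stats_lines.append(f" {file_path}")
--         elif line.startswith('---') or line.startswith('+++'):
--             continue
--         elif line.startswith('@@'):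
--             break
--
--     # If we have file stats, use them; otherwise create a summary
--     if stats_lines:
--         return '\n'.join(stats_lines[:10])  # Limit to 10 files
--     else:
--         # Fallback: just count changed lines
--         added = sum(1 for l in lines if l.startswith('+') and not l.startswith('+++'))
--         removed = sum(1 for l in lines if l.startswith('-') and not l.startswith('---'))
--         return f" {len(lines)} lines changed (+{added}, -{removed})"
-- ===== SOURCE B (Python) =====
-- def get_diff_stats(diff: str) -> str:
--     """Extract diff stats (file changes summary) from full diff."""
--     lines = diff.split('\n')
--     # single fused pass: a state machine that simultaneously collects the
--     # header entries (until the first hunk header flips `collecting` off)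
--     # and maintains the +/- fallback counters over every line.
--     collecting = True
--     stats = []
--     added = 0
--     removed = 0
--     for line in lines:
--         if collecting:
--             if line.startswith('@@'):
--                 collecting = False
--             elif line.startswith('diff --git'):
--                 parts = line.split()
--                 if len(parts) >= 4:
--                     stats.append(" " + parts[2].replace('a/', ''))
--         if line.startswith('+') and not line.startswith('+++'):
--             added += 1
--         elif line.startswith('-') and not line.startswith('---'):
--             removed += 1
--     if stats:
--         return '\n'.join(stats[:10])
--     return f" {len(lines)} lines changed (+{added}, -{removed})"
-- ===== Notes on version B (the rewrite author's own statement) =====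
-- stated objective: alternative
-- what changed: Replaces A's three staged traversals (a for-loop with break collecting header entries, then two separate generator-sum passes for the +/- fallback counts) by ONE fused pass: a state machine over all lines carrying the state (collecting, stats, added, removed), deciding the output only after the single traversal.
import Mathlib
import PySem

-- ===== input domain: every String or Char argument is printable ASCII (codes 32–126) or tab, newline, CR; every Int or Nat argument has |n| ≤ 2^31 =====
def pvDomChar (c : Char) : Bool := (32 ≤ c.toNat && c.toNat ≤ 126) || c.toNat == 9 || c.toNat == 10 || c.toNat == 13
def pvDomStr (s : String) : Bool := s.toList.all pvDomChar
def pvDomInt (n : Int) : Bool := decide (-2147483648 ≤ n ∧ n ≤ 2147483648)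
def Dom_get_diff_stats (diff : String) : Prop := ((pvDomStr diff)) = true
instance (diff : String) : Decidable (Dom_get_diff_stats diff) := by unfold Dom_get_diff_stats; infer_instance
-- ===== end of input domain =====

-- B replaces A's break-loop plus two separate fallback counting passes by ONE fused pass: a state machine over all lines carrying (collecting, stats, added, removed); objective: alternative decomposition, same cost.

-- ===== PORT A =====
-- A's for-loop with break, carried accumulator
def pvLoopA : List String → List String → List String
  | [], acc => acc
  | l :: rest, acc =>
    if PySem.Str.startswith l "diff --git" then
      let parts := PySem.Str.split₀ l
      if parts.length ≥ 4 then
        pvLoopA rest (acc ++ [" " ++ PySem.Str.replace (PySem.List.pyGetD parts 2 "") "a/" ""])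
      else pvLoopA rest acc
    else if PySem.Str.startswith l "---" || PySem.Str.startswith l "+++" then
      pvLoopA rest acc
    else if PySem.Str.startswith l "@@" then acc
    else pvLoopA rest acc

def get_diff_stats (diff : String) : String :=
  let lines := (PySem.Str.split? diff "\n").getD []
  let stats := pvLoopA lines []
  if stats ≠ [] then
    PySem.Str.join "\n" (stats.take 10)
  else
    let added : Int := lines.foldl (fun n l => if (PySem.Str.startswith l "+" && !PySem.Str.startswith l "+++") then n + 1 else n) 0
    let removed : Int := lines.foldl (fun n l => if (PySem.Str.startswith l "-" && !PySem.Str.startswith l "---") then n + 1 else n) 0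
    " " ++ PySem.Int.toStr (lines.length : Int) ++ " lines changed (+" ++ PySem.Int.toStr added ++ ", -" ++ PySem.Int.toStr removed ++ ")"

-- ===== PORT B =====
-- one step of B's fused state machine over state (collecting, stats, added, removed)
def pvStep (s : Bool × List String × Int × Int) (l : String) : Bool × List String × Int × Int :=
  let cs : Bool × List String :=
    if s.1 then
      if PySem.Str.startswith l "@@" then (false, s.2.1)
      else if PySem.Str.startswith l "diff --git" then
        let parts := PySem.Str.split₀ l
        if parts.length ≥ 4 then
          (true, s.2.1 ++ [" " ++ PySem.Str.replace (PySem.List.pyGetD parts 2 "") "a/" ""])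
        else (true, s.2.1)
      else (true, s.2.1)
    else (false, s.2.1)
  if PySem.Str.startswith l "+" && !PySem.Str.startswith l "+++" then
    (cs.1, cs.2, s.2.2.1 + 1, s.2.2.2)
  else if PySem.Str.startswith l "-" && !PySem.Str.startswith l "---" then
    (cs.1, cs.2, s.2.2.1, s.2.2.2 + 1)
  else (cs.1, cs.2, s.2.2.1, s.2.2.2)

def get_diff_stats_alt (diff : String) : String :=
  let lines := (PySem.Str.split? diff "\n").getD []
  let res := lines.foldl pvStep (true, [], 0, 0)
  if res.2.1 ≠ [] then
    PySem.Str.join "\n" (res.2.1.take 10)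
  else
    " " ++ PySem.Int.toStr (lines.length : Int) ++ " lines changed (+" ++ PySem.Int.toStr res.2.2.1 ++ ", -" ++ PySem.Int.toStr res.2.2.2 ++ ")"

-- ===== PRECONDITION & SPEC =====
def Spec_get_diff_stats (diff : String) (out : String) : Prop := out = get_diff_stats_alt diff
instance (diff : String) (out : String) : Decidable (Spec_get_diff_stats diff out) := by unfold Spec_get_diff_stats; infer_instance

-- ===== CLAIM =====
def Claim_equal_get_diff_stats : Prop := ∀ (diff : String), Dom_get_diff_stats diff → Spec_get_diff_stats diff (get_diff_stats diff)

-- ===== LEMMAS AND PROOFS =====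

theorem pv_head_of_startswith {l p : String} (h : PySem.Str.startswith l p = true)
    {c : Char} {cs : List Char} (hp : p.toList = c :: cs) : l.toList.head? = some c := by
  rw [PySem.Str.startswith_eq] at h
  rw [PySem.Chars.startswith_iff] at h
  rcases h with ⟨t, ht⟩
  rw [hp] at ht
  rw [← ht]
  rfl

theorem pv_at_not_dg {l : String} (h : PySem.Str.startswith l "@@" = true) :
    PySem.Str.startswith l "diff --git" = false := by
  by_contra hne
  have hd := pv_head_of_startswith (p := "diff --git") (c := 'd') (cs := "iff --git".toList)
    (by simpa using (Bool.not_eq_false _).mp hne) rfl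
  have ha := pv_head_of_startswith (p := "@@") (c := '@') (cs := ['@']) h rfl
  rw [hd] at ha; simp at ha

theorem pv_at_not_mm {l : String} (h : PySem.Str.startswith l "@@" = true) :
    PySem.Str.startswith l "---" = false := by
  by_contra hne
  have hd := pv_head_of_startswith (p := "---") (c := '-') (cs := ['-','-'])
    (by simpa using (Bool.not_eq_false _).mp hne) rfl
  have ha := pv_head_of_startswith (p := "@@") (c := '@') (cs := ['@']) h rfl
  rw [hd] at ha; simp at ha

theorem pv_at_not_pp {l : String} (h : PySem.Str.startswith l "@@" = true) :
    PySem.Str.startswith l "+++" = false := by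
  by_contra hne
  have hd := pv_head_of_startswith (p := "+++") (c := '+') (cs := ['+','+'])
    (by simpa using (Bool.not_eq_false _).mp hne) rfl
  have ha := pv_head_of_startswith (p := "@@") (c := '@') (cs := ['@']) h rfl
  rw [hd] at ha; simp at ha

theorem pv_plus_not_minus {l : String} (h : PySem.Str.startswith l "+" = true) :
    PySem.Str.startswith l "-" = false := by
  by_contra hne
  have h1 := pv_head_of_startswith (p := "+") (c := '+') (cs := []) h rfl
  have h2 := pv_head_of_startswith (p := "-") (c := '-') (cs := [])
    (by simpa using (Bool.not_eq_false _).mp hne) rfl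
  rw [h1] at h2; simp at h2

def pvPadd (l : String) : Bool := PySem.Str.startswith l "+" && !PySem.Str.startswith l "+++"
def pvPrem (l : String) : Bool := PySem.Str.startswith l "-" && !PySem.Str.startswith l "---"

theorem pv_excl {l : String} (h : pvPadd l = true) : pvPrem l = false := by
  have h' := h
  unfold pvPadd at h'
  rw [Bool.and_eq_true] at h'
  have h1 : PySem.Str.startswith l "+" = true := h'.1
  unfold pvPrem
  rw [pv_plus_not_minus h1]
  rfl

-- the collecting/stats part of one step, isolated
def pvCS (col : Bool) (stats : List String) (l : String) : Bool × List String :=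
  if col then
    if PySem.Str.startswith l "@@" then (false, stats)
    else if PySem.Str.startswith l "diff --git" then
      if (PySem.Str.split₀ l).length ≥ 4 then
        (true, stats ++ [" " ++ PySem.Str.replace (PySem.List.pyGetD (PySem.Str.split₀ l) 2 "") "a/" ""])
      else (true, stats)
    else (true, stats)
  else (false, stats)

theorem pvStep_eq (col : Bool) (stats : List String) (a r : Int) (l : String) :
    pvStep (col, stats, a, r) l
      = ((pvCS col stats l).1, (pvCS col stats l).2,
         a + (if pvPadd l then 1 else 0), r + (if pvPrem l then 1 else 0)) := by
  by_cases hA : pvPadd l = true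
  · have hR := pv_excl hA
    unfold pvPadd at hA
    unfold pvPrem at hR
    simp only [pvStep, pvCS, pvPadd, pvPrem, hA, hR, if_true, Bool.false_eq_true, if_false, add_zero]
  · rw [Bool.not_eq_true] at hA
    by_cases hR : pvPrem l = true
    · unfold pvPadd at hA
      unfold pvPrem at hR
      simp only [pvStep, pvCS, pvPadd, pvPrem, hA, hR, if_true, Bool.false_eq_true, if_false, add_zero]
    · rw [Bool.not_eq_true] at hR
      unfold pvPadd at hA
      unfold pvPrem at hR
      simp only [pvStep, pvCS, pvPadd, pvPrem, hA, hR, Bool.false_eq_true, if_false, add_zero]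

theorem pvLoopA_acc (lines : List String) : ∀ acc, pvLoopA lines acc = acc ++ pvLoopA lines [] := by
  induction lines with
  | nil => intro acc; simp [pvLoopA]
  | cons l rest ih =>
    intro acc
    unfold pvLoopA
    simp only [List.nil_append]
    split_ifs
    · conv_lhs => rw [ih]
      conv_rhs => rw [ih]
      simp [List.append_assoc]
    · exact ih acc
    · exact ih acc
    · simp
    · exact ih acc

-- the fused fold's state, for collecting = false and collecting = true
theorem pv_fold (lines : List String) : ∀ stats a r,
    (List.foldl pvStep (false, stats, a, r) lines).2
      = (stats, a + (lines.countP pvPadd : Int), r + (lines.countP pvPrem : Int))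
    ∧ (List.foldl pvStep (true, stats, a, r) lines).2
      = (stats ++ pvLoopA lines [], a + (lines.countP pvPadd : Int), r + (lines.countP pvPrem : Int)) := by
  induction lines with
  | nil => intro stats a r; simp [pvLoopA]
  | cons l rest ih =>
    intro stats a r
    have hc : ∀ (p : String → Bool) (x : Int),
        (x + (if p l then 1 else 0)) + (rest.countP p : Int) = x + ((l :: rest).countP p : Int) := by
      intro p x
      rw [List.countP_cons]
      push_cast
      split_ifs <;> ring
    constructor
    · rw [List.foldl_cons, pvStep_eq]
      have hcs : pvCS false stats l = (false, stats) := by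
        unfold pvCS; rw [if_neg (by simp)]
      rw [hcs]
      rw [(ih stats _ _).1]
      exact Prod.ext rfl (Prod.ext (hc _ _) (hc _ _))
    · by_cases hq : PySem.Str.startswith l "@@" = true
      · have hcs : pvCS true stats l = (false, stats) := by
          unfold pvCS
          rw [if_pos rfl, if_pos hq]
        have hA0 : pvLoopA (l :: rest) [] = [] := by
          unfold pvLoopA
          rw [if_neg (by simpa using pv_at_not_dg hq),
              if_neg (by simpa using And.intro (pv_at_not_mm hq) (pv_at_not_pp hq)), if_pos hq]
        rw [List.foldl_cons, pvStep_eq, hcs]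
        rw [(ih stats _ _).1, hA0, List.append_nil]
        exact Prod.ext rfl (Prod.ext (hc _ _) (hc _ _))
      · have hstats : ∃ st', pvCS true stats l = (true, st')
            ∧ st' ++ pvLoopA rest [] = stats ++ pvLoopA (l :: rest) [] := by
          by_cases hd : PySem.Str.startswith l "diff --git" = true
          · by_cases h4 : (PySem.Str.split₀ l).length ≥ 4
            · refine ⟨stats ++ [" " ++ PySem.Str.replace (PySem.List.pyGetD (PySem.Str.split₀ l) 2 "") "a/" ""],
                by unfold pvCS; rw [if_pos rfl, if_neg hq, if_pos hd, if_pos h4], ?_⟩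
              conv_rhs => rw [pvLoopA]
              rw [if_pos hd, if_pos h4, List.nil_append]
              simp [List.append_assoc,
                pvLoopA_acc rest [" " ++ PySem.Str.replace (PySem.List.pyGetD (PySem.Str.split₀ l) 2 "") "a/" ""]]
            · refine ⟨stats, by unfold pvCS; rw [if_pos rfl, if_neg hq, if_pos hd, if_neg h4], ?_⟩
              conv_rhs => rw [pvLoopA]
              rw [if_pos hd, if_neg h4]
          · refine ⟨stats, by unfold pvCS; rw [if_pos rfl, if_neg hq, if_neg hd], ?_⟩
            conv_rhs => rw [pvLoopA]
            by_cases hm : (PySem.Str.startswith l "---" || PySem.Str.startswith l "+++") = true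
            · rw [if_neg hd, if_pos hm]
            · rw [if_neg hd, if_neg hm, if_neg hq]
        obtain ⟨st', hcs, hst⟩ := hstats
        rw [List.foldl_cons, pvStep_eq, hcs]
        rw [(ih st' _ _).2, hst]
        exact Prod.ext rfl (Prod.ext (hc _ _) (hc _ _))

-- ===== VERDICT =====
theorem get_diff_stats_spec : Claim_equal_get_diff_stats := by
  intro diff _
  unfold Spec_get_diff_stats get_diff_stats get_diff_stats_alt
  have hf := (pv_fold ((PySem.Str.split? diff "\n").getD []) [] 0 0).2
  have h1 : ((((PySem.Str.split? diff "\n").getD []).foldl pvStep (true, [], 0, 0)).2.1)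
      = pvLoopA ((PySem.Str.split? diff "\n").getD []) [] := by rw [hf]; simp
  have h2 : ((((PySem.Str.split? diff "\n").getD []).foldl pvStep (true, [], 0, 0)).2.2.1)
      = ((((PySem.Str.split? diff "\n").getD []).countP pvPadd : Nat) : Int) := by rw [hf]; simp
  have h3 : ((((PySem.Str.split? diff "\n").getD []).foldl pvStep (true, [], 0, 0)).2.2.2)
      = ((((PySem.Str.split? diff "\n").getD []).countP pvPrem : Nat) : Int) := by rw [hf]; simp
  simp only [h1, h2, h3, PySem.List.foldl_if_add_one, zero_add]
  rfl
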